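-- pv_equiv track=rewrite | github.com/Sungho95/Coding-Test | 프로그래머스/Python/모의고사.py | solution
-- ===== SOURCE A (Python) =====
-- def solution(answers):
--     answer = []
--
--     one = []
--     two = []
--     two_n = 1
--     three = []
--
--     cnt1 = 0
--     cnt2 = 0
--     cnt3 = 0
--
--     for i in range(len(answers)):
--         if i % 5 == 0:
--             one.append(1)
--         else:
--             one.append((i % 5) + 1)
--
--         if i % 2 == 0:
--             two.append(2)
--         else:
--             two.append(two_n)
--             two_n += 1
--             if two_n == 2:
--                 two_n += 1
--             elif two_n > 5:
--                 two_n = 1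
--
--         if i % 10 == 0 or i % 10 == 1:
--             three.append(3)
--         elif 2 <= i % 10 <= 3:
--             three.append(1)
--         elif 4 <= i % 10 <= 5:
--             three.append(2)
--         elif 6 <= i % 10 <= 7:
--             three.append(4)
--         else:
--             three.append(5)
--
--     for i in range(len(answers)):
--         if answers[i] == one[i]:
--             cnt1 += 1
--         if answers[i] == two[i]:
--             cnt2 += 1
--         if answers[i] == three[i]:
--             cnt3 += 1
--
--     max_n = max(cnt1, cnt2, cnt3)
--
--     if cnt1 == max_n:
--         answer.append(1)
--     if cnt2 == max_n:
--         answer.append(2)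
--     if cnt3 == max_n:
--         answer.append(3)
--
--     return answer
-- ===== SOURCE B (Python) =====
-- def solution(answers):
--     p1 = [1, 2, 3, 4, 5]
--     p2 = [2, 1, 2, 3, 2, 4, 2, 5]
--     p3 = [3, 3, 1, 1, 2, 2, 4, 4, 5, 5]
--     c1 = c2 = c3 = 0
--     for i, a in enumerate(answers):
--         if a == p1[i % 5]:
--             c1 += 1
--         if a == p2[i % 8]:
--             c2 += 1
--         if a == p3[i % 10]:
--             c3 += 1
--     m = max(c1, c2, c3)
--     return [j + 1 for j, c in enumerate((c1, c2, c3)) if c == m]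
-- ===== Notes on version B (the rewrite author's own statement) =====
-- stated objective: idiomatic
-- what changed: Replaces A's two-pass build-the-three-full-pattern-lists-then-compare (with a stateful counter constructing pattern two) by a single pass over enumerate(answers) comparing against three small fixed cyclic tables via modulo indexing; no per-input pattern lists are materialised.
import Mathlib
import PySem

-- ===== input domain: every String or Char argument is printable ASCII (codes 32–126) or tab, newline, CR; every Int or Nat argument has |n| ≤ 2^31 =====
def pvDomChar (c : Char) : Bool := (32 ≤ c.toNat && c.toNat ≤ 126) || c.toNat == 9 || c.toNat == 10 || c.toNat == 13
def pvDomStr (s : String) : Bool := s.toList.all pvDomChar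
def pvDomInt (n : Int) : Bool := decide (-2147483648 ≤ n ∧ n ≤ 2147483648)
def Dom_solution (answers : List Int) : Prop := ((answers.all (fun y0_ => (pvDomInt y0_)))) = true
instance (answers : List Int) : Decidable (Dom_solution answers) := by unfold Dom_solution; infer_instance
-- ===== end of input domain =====

-- B replaces A's two-pass build-then-compare with a single modulo-indexed pass over fixed tables (idiomatic; O(1) extra space).

-- ===== PORT A =====
-- one iteration of A's first loop: state (one, two, two_n, three)
def pvStepA (s : List Int × List Int × Int × List Int) (i : Int) :
    List Int × List Int × Int × List Int :=
  match s with
  | (one, two, two_n, three) =>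
    let one := if PySem.Int.mod i 5 = 0 then one ++ [1] else one ++ [PySem.Int.mod i 5 + 1]
    let tw : List Int × Int :=
      if PySem.Int.mod i 2 = 0 then (two ++ [2], two_n)
      else
        let two := two ++ [two_n]
        let t := two_n + 1
        let t := if t = 2 then t + 1 else if 5 < t then 1 else t
        (two, t)
    let three :=
      if PySem.Int.mod i 10 = 0 ∨ PySem.Int.mod i 10 = 1 then three ++ [3]
      else if 2 ≤ PySem.Int.mod i 10 ∧ PySem.Int.mod i 10 ≤ 3 then three ++ [1]
      else if 4 ≤ PySem.Int.mod i 10 ∧ PySem.Int.mod i 10 ≤ 5 then three ++ [2]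
      else if 6 ≤ PySem.Int.mod i 10 ∧ PySem.Int.mod i 10 ≤ 7 then three ++ [4]
      else three ++ [5]
    (one, tw.1, tw.2, three)

def solution (answers : List Int) : List Int :=
  let st := (PySem.List.pyRange 0 (answers.length : Int) 1).foldl pvStepA ([], [], 1, [])
  let one := st.1
  let two := st.2.1
  let three := st.2.2.2
  -- answers[i], one[i], … are always in range here, so pyGetD with default 0 is exact
  let cnts := (PySem.List.pyRange 0 (answers.length : Int) 1).foldl
    (fun (c : Int × Int × Int) i =>
      let c1 := if PySem.List.pyGetD answers i 0 = PySem.List.pyGetD one i 0 then c.1 + 1 else c.1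
      let c2 := if PySem.List.pyGetD answers i 0 = PySem.List.pyGetD two i 0 then c.2.1 + 1 else c.2.1
      let c3 := if PySem.List.pyGetD answers i 0 = PySem.List.pyGetD three i 0 then c.2.2 + 1 else c.2.2
      (c1, c2, c3)) ((0 : Int), (0 : Int), (0 : Int))
  let maxn := max (max cnts.1 cnts.2.1) cnts.2.2
  ((if cnts.1 = maxn then [1] else []) ++ (if cnts.2.1 = maxn then [2] else [])) ++
    (if cnts.2.2 = maxn then [3] else [])

-- ===== PORT B =====
def pvP1 : List Int := [1, 2, 3, 4, 5]
def pvP2 : List Int := [2, 1, 2, 3, 2, 4, 2, 5]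
def pvP3 : List Int := [3, 3, 1, 1, 2, 2, 4, 4, 5, 5]

-- p1[i%5] etc. are always in range (0 ≤ i%m < m), so pyGetD with default 0 is exact
def pvStepB (c : Int × Int × Int) (ia : Int × Int) : Int × Int × Int :=
  let c1 := if ia.2 = PySem.List.pyGetD pvP1 (PySem.Int.mod ia.1 5) 0 then c.1 + 1 else c.1
  let c2 := if ia.2 = PySem.List.pyGetD pvP2 (PySem.Int.mod ia.1 8) 0 then c.2.1 + 1 else c.2.1
  let c3 := if ia.2 = PySem.List.pyGetD pvP3 (PySem.Int.mod ia.1 10) 0 then c.2.2 + 1 else c.2.2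
  (c1, c2, c3)

def solution_alt (answers : List Int) : List Int :=
  let c := (PySem.List.enumerate answers 0).foldl pvStepB ((0 : Int), (0 : Int), (0 : Int))
  let m := max (max c.1 c.2.1) c.2.2
  (PySem.List.enumerate [c.1, c.2.1, c.2.2] 0).foldl
    (fun acc jc => if jc.2 = m then acc ++ [jc.1 + 1] else acc) []

-- ===== PRECONDITION & SPEC =====
def Spec_solution (answers : List Int) (out : List Int) : Prop := out = solution_alt answers
instance (answers : List Int) (out : List Int) : Decidable (Spec_solution answers out) := by unfold Spec_solution; infer_instance

-- ===== CLAIM (what is proved, stated in full; the proofs are below) =====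
def Claim_equal_solution : Prop := ∀ (answers : List Int), Dom_solution answers → Spec_solution answers (solution answers)

-- ===== LEMMAS AND PROOFS =====

-- closed forms of the three pattern entries and of A's running two_n state
def pvQ1 (k : Nat) : Int := pvP1.getD (k % 5) 0
def pvQ2 (k : Nat) : Int := pvP2.getD (k % 8) 0
def pvQ3 (k : Nat) : Int := pvP3.getD (k % 10) 0
def pvTN (n : Nat) : Int := ([1, 3, 4, 5] : List Int).getD ((n / 2) % 4) 0

lemma pv_mod_natCast (n m : Nat) : PySem.Int.mod (n : Int) (m : Int) = ((n % m : Nat) : Int) :=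
  PySem.Int.mod_natCast n m

-- A's first loop builds exactly the three cyclic-table maps, with two_n = pvTN
lemma pv_buildA (n : Nat) :
    (PySem.List.pyRange 0 (n : Int) 1).foldl pvStepA ([], [], 1, []) =
      ((List.range n).map pvQ1, (List.range n).map pvQ2, pvTN n, (List.range n).map pvQ3) := by
  induction n with
  | zero => simp [pvTN]
  | succ n ih =>
    have hc : ((n + 1 : Nat) : Int) = (n : Int) + 1 := by push_cast; ring
    rw [hc, PySem.List.pyRange_one_succ_right (by positivity), List.foldl_append, ih]
    simp only [List.foldl_cons, List.foldl_nil]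
    have m5 : PySem.Int.mod (n : Int) 5 = ((n % 5 : Nat) : Int) := by
      exact_mod_cast pv_mod_natCast n 5
    have m2 : PySem.Int.mod (n : Int) 2 = ((n % 2 : Nat) : Int) := by
      exact_mod_cast pv_mod_natCast n 2
    have m10 : PySem.Int.mod (n : Int) 10 = ((n % 10 : Nat) : Int) := by
      exact_mod_cast pv_mod_natCast n 10
    simp only [pvStepA, m5, m2, m10, List.range_succ, List.map_append, List.map_cons,
      List.map_nil, Prod.mk.injEq]
    refine ⟨?_, ?_, ?_, ?_⟩
    · -- pattern one
      have h5 : n % 5 = 0 ∨ n % 5 = 1 ∨ n % 5 = 2 ∨ n % 5 = 3 ∨ n % 5 = 4 := by omega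
      rcases h5 with h | h | h | h | h <;>
        rw [h] <;> norm_num [pvQ1, pvP1, h]
    · -- pattern two
      have h2 : n % 2 = 0 ∨ n % 2 = 1 := by omega
      rcases h2 with h | h
      · have h8 : n % 8 = 0 ∨ n % 8 = 2 ∨ n % 8 = 4 ∨ n % 8 = 6 := by omega
        rw [h]
        rcases h8 with h' | h' | h' | h' <;> norm_num [pvQ2, pvP2, h']
      · rw [h]
        norm_num [pvQ2, pvP2]
        have h8 : n % 8 = 1 ∨ n % 8 = 3 ∨ n % 8 = 5 ∨ n % 8 = 7 := by omega
        rcases h8 with h' | h' | h' | h' <;>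
          · have hd : n / 2 % 4 = (n % 8) / 2 := by omega
            rw [h'] at hd
            norm_num [pvTN, hd, h']
    · -- two_n
      have h2 : n % 2 = 0 ∨ n % 2 = 1 := by omega
      rcases h2 with h | h
      · have hq : (n + 1) / 2 = n / 2 := by omega
        rw [h]; norm_num [pvTN, hq]
      · rw [h]
        norm_num
        have h8 : (n / 2 % 4 = 0 ∧ (n + 1) / 2 % 4 = 1) ∨ (n / 2 % 4 = 1 ∧ (n + 1) / 2 % 4 = 2) ∨
            (n / 2 % 4 = 2 ∧ (n + 1) / 2 % 4 = 3) ∨ (n / 2 % 4 = 3 ∧ (n + 1) / 2 % 4 = 0) := by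
          omega
        rcases h8 with ⟨hd, hd'⟩ | ⟨hd, hd'⟩ | ⟨hd, hd'⟩ | ⟨hd, hd'⟩ <;> norm_num [pvTN, hd, hd']
    · -- pattern three
      have h10 : n % 10 = 0 ∨ n % 10 = 1 ∨ n % 10 = 2 ∨ n % 10 = 3 ∨ n % 10 = 4 ∨
          n % 10 = 5 ∨ n % 10 = 6 ∨ n % 10 = 7 ∨ n % 10 = 8 ∨ n % 10 = 9 := by omega
      rcases h10 with h | h | h | h | h | h | h | h | h | h <;>
        rw [h] <;> norm_num [pvQ3, pvP3, h]

-- a member of enumerate xs s is (s+k, xs[k])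
lemma pv_enum_mem (xs : List Int) : ∀ (s : Nat) (p : Int × Int),
    p ∈ PySem.List.enumerate xs (s : Int) →
      ∃ k : Nat, p.1 = ((s + k : Nat) : Int) ∧ k < xs.length ∧ xs.getD k 0 = p.2 := by
  induction xs with
  | nil => intro s p hp; simp [PySem.List.enumerate_nil] at hp
  | cons x xs ih =>
    intro s p hp
    rw [PySem.List.enumerate_cons] at hp
    rcases List.mem_cons.mp hp with h | h
    · exact ⟨0, by simp [h], by simp, by simp [h]⟩
    · have : ((s : Int) + 1) = ((s + 1 : Nat) : Int) := by push_cast; ring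
      rw [this] at h
      obtain ⟨k, hk1, hk2, hk3⟩ := ih (s + 1) p h
      refine ⟨k + 1, ?_, by simpa using Nat.succ_lt_succ hk2, by simpa using hk3⟩
      rw [hk1]; push_cast; ring

-- A's second loop, reading the three built lists, is B's single enumerate pass
lemma pv_count (answers : List Int) :
    (PySem.List.pyRange 0 (answers.length : Int) 1).foldl
      (fun (c : Int × Int × Int) i =>
        let c1 := if PySem.List.pyGetD answers i 0 =
            PySem.List.pyGetD ((List.range answers.length).map pvQ1) i 0 then c.1 + 1 else c.1
        let c2 := if PySem.List.pyGetD answers i 0 =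
            PySem.List.pyGetD ((List.range answers.length).map pvQ2) i 0 then c.2.1 + 1 else c.2.1
        let c3 := if PySem.List.pyGetD answers i 0 =
            PySem.List.pyGetD ((List.range answers.length).map pvQ3) i 0 then c.2.2 + 1 else c.2.2
        (c1, c2, c3)) ((0 : Int), (0 : Int), (0 : Int)) =
    (PySem.List.enumerate answers 0).foldl pvStepB ((0 : Int), (0 : Int), (0 : Int)) := by
  have hr : PySem.List.pyRange 0 (answers.length : Int) 1 =
      (PySem.List.enumerate answers 0).map (fun p => p.1) := by
    rw [PySem.List.map_fst_enumerate]; norm_num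
  rw [hr, List.foldl_map]
  apply PySem.List.foldl_congr_mem
  intro c p hp
  obtain ⟨k, hk1, hk2, hk3⟩ := pv_enum_mem answers 0 p hp
  rw [Nat.zero_add] at hk1
  have e0 : PySem.List.pyGetD answers p.1 0 = p.2 := by
    rw [hk1, PySem.List.pyGetD_natCast, hk3]
  have emod : ∀ m : Nat, PySem.Int.mod p.1 (m : Int) = ((k % m : Nat) : Int) := by
    intro m; rw [hk1]; exact pv_mod_natCast k m
  have e1 : PySem.List.pyGetD ((List.range answers.length).map pvQ1) p.1 0 =
      PySem.List.pyGetD pvP1 (PySem.Int.mod p.1 5) 0 := by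
    rw [hk1, PySem.List.pyGetD_natCast, PySem.List.getD_map_range _ _ _ _ hk2,
      show ((5 : Int) = ((5 : Nat) : Int)) from rfl, ← hk1, emod 5, PySem.List.pyGetD_natCast]
    rfl
  have e2 : PySem.List.pyGetD ((List.range answers.length).map pvQ2) p.1 0 =
      PySem.List.pyGetD pvP2 (PySem.Int.mod p.1 8) 0 := by
    rw [hk1, PySem.List.pyGetD_natCast, PySem.List.getD_map_range _ _ _ _ hk2,
      show ((8 : Int) = ((8 : Nat) : Int)) from rfl, ← hk1, emod 8, PySem.List.pyGetD_natCast]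
    rfl
  have e3 : PySem.List.pyGetD ((List.range answers.length).map pvQ3) p.1 0 =
      PySem.List.pyGetD pvP3 (PySem.Int.mod p.1 10) 0 := by
    rw [hk1, PySem.List.pyGetD_natCast, PySem.List.getD_map_range _ _ _ _ hk2,
      show ((10 : Int) = ((10 : Nat) : Int)) from rfl, ← hk1, emod 10, PySem.List.pyGetD_natCast]
    rfl
  simp only [pvStepB, e0, e1, e2, e3]

theorem solution_spec : Claim_equal_solution := by
  intro answers _
  unfold Spec_solution solution solution_alt
  simp only [pv_buildA answers.length, pv_count answers]
  simp only [PySem.List.enumerate_cons, PySem.List.enumerate_nil, List.foldl_cons, List.foldl_nil]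
  split_ifs <;> norm_num
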